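-- pv_equiv track=rewrite | github.com/TheFenrisLycaon/DSA-C-- | daily_problems/GeeksForGeeks/0317.py | kvowelwords
-- ===== SOURCE A (Python) =====
-- def kvowelwords(N: int, K: int) -> int:
--     mod = 10**9 + 7
--     dp = [1]
--     dpp = [1]
--     for _ in range(K):
--         dpp.append((dpp[-1] * 5) % mod)
--     for i in range(1, N + 1):
--         tot = 0
--         for j in range(min(i + 1, K + 1)):
--             count = dpp[j]
--             if i > j:
--                 count = (count * 21 * dp[i - j - 1]) % mod
--             tot = (tot + count) % mod
--         dp.append(tot)
--     return dp[-1]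
-- ===== SOURCE B (Python) =====
-- def kvowelwords(N: int, K: int) -> int:
--     mod = 10**9 + 7
--     if K < 0:
--         return 1 if N <= 0 else 0
--     pK = pow(5, K, mod)
--     dp = [1]
--     T = 1          # T = sum_{j=0}^{min(i-1,K)} 5^j * dp[i-1-j]  (mod), for current i
--     pw = 5 % mod   # pw = 5^i mod
--     for i in range(1, N + 1):
--         cur = (21 * T + (pw if i <= K else 0)) % mod
--         dp.append(cur)
--         if i > K:
--             T = (cur + 5 * (T - pK * dp[i - 1 - K])) % mod
--         else:
--             T = (cur + 5 * T) % mod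
--         pw = pw * 5 % mod
--     return dp[-1]
-- ===== Notes on version B (the rewrite author's own statement) =====
-- stated objective: faster
-- what changed: A recomputes the weighted vowel-window sum from scratch for every word length (inner loop over up to K+1 terms); B maintains that window sum with an O(1) sliding-window update (add the new dp value, shift by 5, drop the expired 5^K-weighted term), plus precomputed pow(5,K,mod), removing the inner loop entirely.
import Mathlib
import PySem

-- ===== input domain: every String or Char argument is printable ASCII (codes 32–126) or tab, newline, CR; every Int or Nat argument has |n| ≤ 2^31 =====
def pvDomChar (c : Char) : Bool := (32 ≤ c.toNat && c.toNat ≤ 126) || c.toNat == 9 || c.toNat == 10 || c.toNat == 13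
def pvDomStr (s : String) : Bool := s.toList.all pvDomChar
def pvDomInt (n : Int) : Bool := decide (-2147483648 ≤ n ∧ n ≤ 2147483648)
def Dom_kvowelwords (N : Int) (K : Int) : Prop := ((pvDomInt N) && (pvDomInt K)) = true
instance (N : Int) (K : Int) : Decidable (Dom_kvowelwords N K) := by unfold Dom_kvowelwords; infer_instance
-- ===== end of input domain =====

-- B replaces A's O(N·K) per-step re-summation of the vowel window by an O(N)
-- sliding-window recurrence for the weighted window sum; same return value everywhere.

-- ===== PORT A =====
def kvowelwords (N : Int) (K : Int) : Int :=
  let m : Int := 10 ^ 9 + 7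
  let dpp : List Int :=
    (PySem.List.pyRange 0 K 1).foldl
      (fun dpp _ => dpp ++ [PySem.Int.mod (PySem.List.pyGetD dpp (-1) 0 * 5) m]) [1]
  let dp : List Int :=
    (PySem.List.pyRange 1 (N + 1) 1).foldl
      (fun dp i =>
        let tot : Int :=
          (PySem.List.pyRange 0 (min (i + 1) (K + 1)) 1).foldl
            (fun tot j =>
              let count := PySem.List.pyGetD dpp j 0
              let count :=
                if i > j then PySem.Int.mod (count * 21 * PySem.List.pyGetD dp (i - j - 1) 0) m
                else count
              PySem.Int.mod (tot + count) m) 0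
        dp ++ [tot]) [1]
  PySem.List.pyGetD dp (-1) 0

-- ===== PORT B =====
def kvowelwords_alt (N : Int) (K : Int) : Int :=
  let m : Int := 10 ^ 9 + 7
  if K < 0 then (if N ≤ 0 then 1 else 0)
  else
    -- pow(5, K, mod): K ≥ 0 in this branch, so pow's exponent is K.toNat exactly
    let pK : Int := PySem.Int.powMod 5 K.toNat m
    let s : List Int × Int × Int :=
      (PySem.List.pyRange 1 (N + 1) 1).foldl
        (fun s i =>
          let dp := s.1
          let T := s.2.1
          let pw := s.2.2
          let cur := PySem.Int.mod (21 * T + (if i ≤ K then pw else 0)) m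
          let dp := dp ++ [cur]
          let T :=
            if i > K then
              PySem.Int.mod (cur + 5 * (T - pK * PySem.List.pyGetD dp (i - 1 - K) 0)) m
            else
              PySem.Int.mod (cur + 5 * T) m
          (dp, T, PySem.Int.mod (pw * 5) m))
        ([1], 1, PySem.Int.mod 5 m)
    PySem.List.pyGetD s.1 (-1) 0

-- ===== PRECONDITION & SPEC =====
def Spec_kvowelwords (N : Int) (K : Int) (out : Int) : Prop := out = kvowelwords_alt N K
instance (N : Int) (K : Int) (out : Int) : Decidable (Spec_kvowelwords N K out) := by
  unfold Spec_kvowelwords; infer_instance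

-- ===== CLAIM (what is proved, stated in full; the proofs are below) =====
def Claim_equal_kvowelwords : Prop := ∀ (N : Int) (K : Int), Dom_kvowelwords N K → Spec_kvowelwords N K (kvowelwords N K)

-- ===== LEMMAS AND PROOFS =====

-- A's dpp-building loop, A's inner summation loop, and the two loop bodies, as named
-- functions (definitionally equal to the lambdas inside the ports).
def pvDpp (K : Int) : List Int :=
  (PySem.List.pyRange 0 K 1).foldl
    (fun dpp _ => dpp ++ [PySem.Int.mod (PySem.List.pyGetD dpp (-1) 0 * 5) (10 ^ 9 + 7)]) [1]

def pvTotA (K : Int) (dpp dp : List Int) (i : Int) : Int :=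
  (PySem.List.pyRange 0 (min (i + 1) (K + 1)) 1).foldl
    (fun tot j =>
      let count := PySem.List.pyGetD dpp j 0
      let count :=
        if i > j then PySem.Int.mod (count * 21 * PySem.List.pyGetD dp (i - j - 1) 0) (10 ^ 9 + 7)
        else count
      PySem.Int.mod (tot + count) (10 ^ 9 + 7)) 0

def pvStepA (K : Int) (dpp dp : List Int) (i : Int) : List Int := dp ++ [pvTotA K dpp dp i]

def pvCur (K : Int) (s : List Int × Int × Int) (i : Int) : Int :=
  PySem.Int.mod (21 * s.2.1 + (if i ≤ K then s.2.2 else 0)) (10 ^ 9 + 7)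

def pvStepB (K pK : Int) (s : List Int × Int × Int) (i : Int) : List Int × Int × Int :=
  (s.1 ++ [pvCur K s i],
   if i > K then
     PySem.Int.mod
       (pvCur K s i + 5 * (s.2.1 - pK * PySem.List.pyGetD (s.1 ++ [pvCur K s i]) (i - 1 - K) 0))
       (10 ^ 9 + 7)
   else PySem.Int.mod (pvCur K s i + 5 * s.2.1) (10 ^ 9 + 7),
   PySem.Int.mod (s.2.2 * 5) (10 ^ 9 + 7))

-- the weighted vowel-window sum that B maintains incrementally
def pvSW (K' : Nat) (L : List Int) (n : Nat) : Int :=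
  ∑ j ∈ Finset.range (min n K' + 1), 5 ^ j * L.getD (n - j) 0

lemma kvowelwords_eq_fold (N K : Int) :
    kvowelwords N K =
      PySem.List.pyGetD
        ((PySem.List.pyRange 1 (N + 1) 1).foldl (pvStepA K (pvDpp K)) [1]) (-1) 0 := rfl

lemma kvowelwords_alt_eq_fold (N K : Int) (h : ¬ K < 0) :
    kvowelwords_alt N K =
      PySem.List.pyGetD
        (((PySem.List.pyRange 1 (N + 1) 1).foldl
            (pvStepB K (PySem.Int.powMod 5 K.toNat (10 ^ 9 + 7)))
            ([1], 1, PySem.Int.mod 5 (10 ^ 9 + 7))).1) (-1) 0 := by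
  simp only [kvowelwords_alt, if_neg h]
  rfl

lemma pv_modeq_self (a m : Int) : a % m ≡ a [ZMOD m] := Int.emod_emod_of_dvd a dvd_rfl

lemma pv_mod_eq_of_modeq {a b m : Int} (h : a ≡ b [ZMOD m]) : a % m = b % m := h

lemma pv_sum_mod_congr (s : Finset ℕ) (f g : ℕ → Int) (m : Int)
    (h : ∀ j ∈ s, f j % m = g j % m) : (∑ j ∈ s, f j) % m = (∑ j ∈ s, g j) % m := by
  rw [Finset.sum_int_mod, Finset.sum_congr rfl h, ← Finset.sum_int_mod]

-- A's inner accumulation 'tot = (tot + c(j)) % m' over range(l) is the sum mod m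
lemma pv_foldsum (m : Int) (hm : 0 < m) (c : Nat → Int) (l : Nat) :
    ∀ t : Int, t % m = t →
      (List.range l).foldl (fun tot j => PySem.Int.mod (tot + c j) m) t
        = (t + ∑ j ∈ Finset.range l, c j) % m := by
  induction l with
  | zero =>
      intro t ht
      simpa using ht.symm
  | succ l ih =>
      intro t ht
      rw [List.range_succ, List.foldl_append, ih t ht]
      simp only [List.foldl_cons, List.foldl_nil]
      rw [PySem.Int.mod_eq_emod_of_pos hm, Int.emod_add_emod, Finset.sum_range_succ,
        ← add_assoc]

lemma pv_dpp_aux (t : Nat) :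
    (List.range t).foldl
        (fun dpp (_ : Nat) =>
          dpp ++ [PySem.Int.mod (PySem.List.pyGetD dpp (-1) 0 * 5) (10 ^ 9 + 7)]) [1]
      = (List.range (t + 1)).map (fun j => 5 ^ j % (10 ^ 9 + 7)) := by
  induction t with
  | zero => norm_num
  | succ t ih =>
      rw [List.range_succ, List.foldl_append, ih]
      simp only [List.foldl_cons, List.foldl_nil]
      have hlast :
          PySem.List.pyGetD
              ((List.range (t + 1)).map (fun j => (5 : Int) ^ j % (10 ^ 9 + 7))) (-1) 0
            = (5 : Int) ^ t % (10 ^ 9 + 7) := by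
        rw [List.range_succ, List.map_append, List.map_cons, List.map_nil]
        exact PySem.List.pyGetD_neg_one_append_singleton _ _ _
      have hmul : ((5 : Int) ^ t % (10 ^ 9 + 7) * 5) % (10 ^ 9 + 7)
          = (5 : Int) ^ (t + 1) % (10 ^ 9 + 7) := by
        refine (pv_mod_eq_of_modeq
            ((pv_modeq_self (5 ^ t) ((10 : Int) ^ 9 + 7)).mul (Int.ModEq.refl 5))).trans ?_
        rw [pow_succ (5 : Int) t]
      simp only [hlast]
      rw [PySem.Int.mod_eq_emod_of_pos (by norm_num), hmul,
        show List.range (t + 1 + 1) = List.range (t + 1) ++ [t + 1] from List.range_succ,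
        List.map_append, List.map_cons, List.map_nil]

-- A's dpp list is [5^0 % m, …, 5^K % m]
lemma pv_dpp_eq (K : Int) (_hK : 0 ≤ K) :
    pvDpp K = (List.range (K.toNat + 1)).map (fun j => 5 ^ j % (10 ^ 9 + 7)) := by
  unfold pvDpp
  rw [PySem.List.pyRange_one 0 K]
  simp only [List.foldl_map]
  rw [show (K - 0).toNat = K.toNat from by norm_num]
  exact pv_dpp_aux K.toNat

lemma pv_dpp_getD (K : Int) (hK : 0 ≤ K) (j : Nat) (hj : j ≤ K.toNat) :
    PySem.List.pyGetD (pvDpp K) (j : Int) 0 = 5 ^ j % (10 ^ 9 + 7) := by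
  rw [PySem.List.pyGetD_natCast, pv_dpp_eq K hK,
    PySem.List.getD_map_range _ _ _ _ (by omega)]

-- A's inner loop at i = n+1 computes (21·SW(n) + [n+1 ≤ K]·5^(n+1)) % m
lemma pv_tot_eq (K : Int) (hK : 0 ≤ K) (L : List Int) (n : Nat) (_hL : L.length = n + 1) :
    pvTotA K (pvDpp K) L (1 + (n : Int))
      = (21 * pvSW K.toNat L n + (if n + 1 ≤ K.toNat then 5 ^ (n + 1) else 0))
          % (10 ^ 9 + 7) := by
  unfold pvTotA
  have hmin : min (1 + (n : Int) + 1) (K + 1) = ((min (n + 1) K.toNat + 1 : Nat) : Int) := by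
    omega
  rw [hmin, PySem.List.pyRange_zero_natCast]
  simp only [List.foldl_map]
  refine (pv_foldsum (10 ^ 9 + 7) (by norm_num)
      (fun j : Nat =>
        if (1 + (n : Int)) > (j : Int) then
          PySem.Int.mod
            (PySem.List.pyGetD (pvDpp K) (j : Int) 0 * 21 *
              PySem.List.pyGetD L (1 + (n : Int) - (j : Int) - 1) 0) (10 ^ 9 + 7)
        else PySem.List.pyGetD (pvDpp K) (j : Int) 0)
      (min (n + 1) K.toNat + 1) 0 (by norm_num)).trans ?_
  rw [zero_add]
  set c : Nat → Int := fun j : Nat =>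
      if (1 + (n : Int)) > (j : Int) then
        PySem.Int.mod
          (PySem.List.pyGetD (pvDpp K) (j : Int) 0 * 21 *
            PySem.List.pyGetD L (1 + (n : Int) - (j : Int) - 1) 0) (10 ^ 9 + 7)
      else PySem.List.pyGetD (pvDpp K) (j : Int) 0 with hc
  have hterm : ∀ j : Nat, j < n + 1 → j ≤ K.toNat →
      c j % (10 ^ 9 + 7) = (21 * (5 ^ j * L.getD (n - j) 0)) % (10 ^ 9 + 7) := by
    intro j hj hjK
    simp only [hc]
    have hcond : (1 + (n : Int)) > (j : Int) := by omega
    have hidx : 1 + (n : Int) - (j : Int) - 1 = ((n - j : Nat) : Int) := by omega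
    rw [if_pos hcond, hidx, pv_dpp_getD K hK j hjK, PySem.List.pyGetD_natCast,
      PySem.Int.mod_eq_emod_of_pos (by norm_num), Int.emod_emod_of_dvd _ dvd_rfl]
    refine (pv_mod_eq_of_modeq
        (((pv_modeq_self (5 ^ j) _).mul (Int.ModEq.refl 21)).mul
          (Int.ModEq.refl (L.getD (n - j) 0)))).trans ?_
    congr 1
    ring
  by_cases h : n + 1 ≤ K.toNat
  · rw [if_pos h, (by omega : min (n + 1) K.toNat = n + 1), Finset.sum_range_succ,
      Int.add_emod,
      pv_sum_mod_congr (Finset.range (n + 1)) c (fun j => 21 * (5 ^ j * L.getD (n - j) 0)) _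
        (fun j hj => hterm j (Finset.mem_range.mp hj)
          (by have := Finset.mem_range.mp hj; omega)),
      ← Finset.mul_sum]
    have hlast : c (n + 1) % (10 ^ 9 + 7) = 5 ^ (n + 1) % (10 ^ 9 + 7) := by
      simp only [hc]
      rw [if_neg (by omega : ¬ (1 + (n : Int)) > ((n + 1 : Nat) : Int)),
        pv_dpp_getD K hK (n + 1) h, Int.emod_emod_of_dvd _ dvd_rfl]
    rw [hlast, ← Int.add_emod]
    unfold pvSW
    rw [(by omega : min n K.toNat = n)]
  · rw [if_neg h, add_zero, (by omega : min (n + 1) K.toNat = K.toNat),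
      pv_sum_mod_congr (Finset.range (K.toNat + 1)) c
        (fun j => 21 * (5 ^ j * L.getD (n - j) 0)) _
        (fun j hj => hterm j (by have := Finset.mem_range.mp hj; omega)
          (by have := Finset.mem_range.mp hj; omega)),
      ← Finset.mul_sum]
    unfold pvSW
    rw [(by omega : min n K.toNat = K.toNat)]

-- unfolding the window one step after appending the new dp value
lemma pv_SW_succ (K' : Nat) (L : List Int) (cur : Int) (n : Nat) (hL : L.length = n + 1) :
    pvSW K' (L ++ [cur]) (n + 1)
      = cur + 5 * ∑ j ∈ Finset.range (min (n + 1) K'), 5 ^ j * L.getD (n - j) 0 := by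
  unfold pvSW
  rw [Finset.sum_range_succ']
  have h0 : (L ++ [cur]).getD (n + 1 - 0) 0 = cur := by
    rw [Nat.sub_zero, List.getD_append_right _ _ _ _ (by omega)]
    simp [hL]
  have hterm : ∀ j ∈ Finset.range (min (n + 1) K'),
      5 ^ (j + 1) * (L ++ [cur]).getD (n + 1 - (j + 1)) 0
        = 5 * (5 ^ j * L.getD (n - j) 0) := by
    intro j hj
    have hj' : j < min (n + 1) K' := Finset.mem_range.mp hj
    have hidx : n + 1 - (j + 1) = n - j := by omega
    rw [hidx, List.getD_append _ _ _ _ (by omega), pow_succ]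
    ring
  rw [Finset.sum_congr rfl hterm, ← Finset.mul_sum, h0, pow_zero, one_mul]
  ring

-- main loop invariant: after n iterations the two loops carry the same dp list,
-- B's T is the window sum mod m and B's pw is 5^(n+1) mod m
lemma pv_main (K : Int) (hK : 0 ≤ K) (n : Nat) :
    ∃ (L : List Int) (T pw : Int),
      (List.range n).foldl (fun dp (k : Nat) => pvStepA K (pvDpp K) dp (1 + (k : Int))) [1]
          = L ∧
      (List.range n).foldl
          (fun s (k : Nat) =>
            pvStepB K (PySem.Int.powMod 5 K.toNat (10 ^ 9 + 7)) s (1 + (k : Int)))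
          ([1], 1, PySem.Int.mod 5 (10 ^ 9 + 7)) = (L, T, pw) ∧
      L.length = n + 1 ∧
      pw = 5 ^ (n + 1) % (10 ^ 9 + 7) ∧
      T = pvSW K.toNat L n % (10 ^ 9 + 7) := by
  induction n with
  | zero =>
      refine ⟨[1], 1, PySem.Int.mod 5 (10 ^ 9 + 7), by simp, by simp, rfl, ?_, ?_⟩
      · rw [PySem.Int.mod_eq_emod_of_pos (by norm_num)]; norm_num
      · unfold pvSW; norm_num [Finset.sum_range_one]
  | succ n ih =>
      obtain ⟨L, T, pw, hA, hB, hL, hpw, hT⟩ := ih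
      rw [List.range_succ, List.foldl_append, List.foldl_append, hA, hB]
      simp only [List.foldl_cons, List.foldl_nil]
      have hcur : pvCur K (L, T, pw) (1 + (n : Int)) = pvTotA K (pvDpp K) L (1 + (n : Int)) := by
        show PySem.Int.mod (21 * T + (if (1 + (n : Int)) ≤ K then pw else 0)) (10 ^ 9 + 7)
          = pvTotA K (pvDpp K) L (1 + (n : Int))
        rw [pv_tot_eq K hK L n hL, PySem.Int.mod_eq_emod_of_pos (by norm_num)]
        refine pv_mod_eq_of_modeq (Int.ModEq.add ?_ ?_)
        · rw [hT]
          exact (pv_modeq_self (pvSW K.toNat L n) _).mul_left 21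
        · by_cases h : n + 1 ≤ K.toNat
          · rw [if_pos (by omega : (1 + (n : Int)) ≤ K), if_pos h, hpw]
            exact pv_modeq_self _ _
          · rw [if_neg (by omega : ¬ (1 + (n : Int)) ≤ K), if_neg h]
      refine ⟨L ++ [pvTotA K (pvDpp K) L (1 + (n : Int))],
        pvSW K.toNat (L ++ [pvTotA K (pvDpp K) L (1 + (n : Int))]) (n + 1) % (10 ^ 9 + 7),
        5 ^ (n + 1 + 1) % (10 ^ 9 + 7), rfl, ?_, by simp [hL], rfl, rfl⟩
      have h1 : (pvStepB K (PySem.Int.powMod 5 K.toNat (10 ^ 9 + 7)) (L, T, pw)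
          (1 + (n : Int))).1 = L ++ [pvTotA K (pvDpp K) L (1 + (n : Int))] := by
        show L ++ [pvCur K (L, T, pw) (1 + (n : Int))] = _
        rw [hcur]
      have h3 : (pvStepB K (PySem.Int.powMod 5 K.toNat (10 ^ 9 + 7)) (L, T, pw)
          (1 + (n : Int))).2.2 = 5 ^ (n + 1 + 1) % (10 ^ 9 + 7) := by
        show PySem.Int.mod (pw * 5) (10 ^ 9 + 7) = 5 ^ (n + 1 + 1) % (10 ^ 9 + 7)
        rw [hpw, PySem.Int.mod_eq_emod_of_pos (by norm_num)]
        refine (pv_mod_eq_of_modeq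
            ((pv_modeq_self (5 ^ (n + 1)) _).mul (Int.ModEq.refl 5))).trans ?_
        rw [pow_succ (5 : Int) (n + 1)]
      have h2 : (pvStepB K (PySem.Int.powMod 5 K.toNat (10 ^ 9 + 7)) (L, T, pw)
          (1 + (n : Int))).2.1
          = pvSW K.toNat (L ++ [pvTotA K (pvDpp K) L (1 + (n : Int))]) (n + 1)
              % (10 ^ 9 + 7) := by
        show (if (1 + (n : Int)) > K then
            PySem.Int.mod
              (pvCur K (L, T, pw) (1 + (n : Int)) + 5 * (T -
                PySem.Int.powMod 5 K.toNat (10 ^ 9 + 7) *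
                  PySem.List.pyGetD (L ++ [pvCur K (L, T, pw) (1 + (n : Int))])
                    (1 + (n : Int) - 1 - K) 0)) (10 ^ 9 + 7)
          else PySem.Int.mod (pvCur K (L, T, pw) (1 + (n : Int)) + 5 * T) (10 ^ 9 + 7)) = _
        rw [hcur]
        by_cases h : n + 1 ≤ K.toNat
        · rw [if_neg (by omega : ¬ (1 + (n : Int)) > K),
            PySem.Int.mod_eq_emod_of_pos (by norm_num),
            pv_SW_succ K.toNat L _ n hL, (by omega : min (n + 1) K.toNat = n + 1)]
          refine pv_mod_eq_of_modeq (Int.ModEq.add (Int.ModEq.refl _) (Int.ModEq.mul_left 5 ?_))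
          rw [hT]
          unfold pvSW
          rw [(by omega : min n K.toNat = n)]
          exact pv_modeq_self _ _
        · have hKn : K.toNat ≤ n := by omega
          have hidx : 1 + (n : Int) - 1 - K = ((n - K.toNat : Nat) : Int) := by omega
          rw [if_pos (by omega : (1 + (n : Int)) > K),
            PySem.Int.mod_eq_emod_of_pos (by norm_num),
            pv_SW_succ K.toNat L _ n hL, (by omega : min (n + 1) K.toNat = K.toNat),
            hidx, PySem.List.pyGetD_natCast,
            List.getD_append _ _ _ _ (by omega : n - K.toNat < L.length),
            PySem.Int.powMod_eq_emod 5 K.toNat (by norm_num)]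
          refine pv_mod_eq_of_modeq (Int.ModEq.add (Int.ModEq.refl _) (Int.ModEq.mul_left 5 ?_))
          rw [hT]
          have hsplit : pvSW K.toNat L n
              = (∑ j ∈ Finset.range K.toNat, 5 ^ j * L.getD (n - j) 0)
                + 5 ^ K.toNat * L.getD (n - K.toNat) 0 := by
            unfold pvSW
            rw [(by omega : min n K.toNat = K.toNat), Finset.sum_range_succ]
          have heq : pvSW K.toNat L n - 5 ^ K.toNat * L.getD (n - K.toNat) 0
              = ∑ j ∈ Finset.range K.toNat, 5 ^ j * L.getD (n - j) 0 := by
            rw [hsplit]; ring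
          have hmod : pvSW K.toNat L n % (10 ^ 9 + 7)
                - 5 ^ K.toNat % (10 ^ 9 + 7) * L.getD (n - K.toNat) 0
              ≡ pvSW K.toNat L n - 5 ^ K.toNat * L.getD (n - K.toNat) 0
                [ZMOD (10 ^ 9 + 7)] :=
            (pv_modeq_self _ _).sub ((pv_modeq_self _ _).mul (Int.ModEq.refl _))
          refine hmod.trans ?_
          rw [heq]
      calc pvStepB K (PySem.Int.powMod 5 K.toNat (10 ^ 9 + 7)) (L, T, pw) (1 + (n : Int))
          = ((pvStepB K (PySem.Int.powMod 5 K.toNat (10 ^ 9 + 7)) (L, T, pw)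
              (1 + (n : Int))).1,
             (pvStepB K (PySem.Int.powMod 5 K.toNat (10 ^ 9 + 7)) (L, T, pw)
              (1 + (n : Int))).2.1,
             (pvStepB K (PySem.Int.powMod 5 K.toNat (10 ^ 9 + 7)) (L, T, pw)
              (1 + (n : Int))).2.2) := rfl
        _ = _ := by rw [h1, h2, h3]

theorem kvowelwords_eq_alt (N K : Int) : kvowelwords N K = kvowelwords_alt N K := by
  by_cases hK : K < 0
  · -- K < 0: A's inner range is empty, every appended tot is 0
    rw [kvowelwords_eq_fold]
    simp only [kvowelwords_alt, if_pos hK]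
    have hstep0 : ∀ (dp : List Int) (i : Int), pvStepA K (pvDpp K) dp i = dp ++ [0] := by
      intro dp i
      unfold pvStepA pvTotA
      rw [PySem.List.pyRange_one_eq_nil (by omega : min (i + 1) (K + 1) ≤ 0)]
      rfl
    have hfold : ∀ (l : List Int) (dp : List Int),
        l.foldl (pvStepA K (pvDpp K)) dp = dp ++ l.map (fun _ => (0 : Int)) := by
      intro l
      induction l with
      | nil => intro dp; simp
      | cons x xs ih =>
          intro dp
          rw [List.foldl_cons, hstep0, ih]
          simp
    rw [hfold]
    by_cases hN : N ≤ 0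
    · rw [if_pos hN, PySem.List.pyRange_one_eq_nil (by omega : N + 1 ≤ 1)]
      simp only [List.map_nil, List.append_nil]
      decide
    · rw [if_neg hN, PySem.List.pyRange_one_succ_right (by omega : (1 : Int) ≤ N),
        List.map_append, List.map_cons, List.map_nil, ← List.append_assoc]
      exact PySem.List.pyGetD_neg_one_append_singleton _ _ _
  · -- K ≥ 0: both loops run in lock step
    have hK' : 0 ≤ K := by omega
    rw [kvowelwords_eq_fold, kvowelwords_alt_eq_fold N K hK,
      PySem.List.pyRange_one 1 (N + 1), (show N + 1 - 1 = N from by ring)]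
    simp only [List.foldl_map]
    obtain ⟨L, T, pw, hA, hB, _, _, _⟩ := pv_main K hK' N.toNat
    rw [hA, hB]

-- ===== VERDICT (by name: the statement is the Claim_ definition above) =====
theorem kvowelwords_spec : Claim_equal_kvowelwords := by
  intro N K _
  unfold Spec_kvowelwords
  exact kvowelwords_eq_alt N K
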